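-- pv_equiv track=rewrite | github.com/keijak/comp-pub | atcoder/dp/M/main.py | solve
-- ===== SOURCE A (Python) =====
-- MOD = 1000000007  # type: int
--
-- def solve(N: int, K: int, a: "List[int]"):
--     dp = [[0] * (K + 1) for _ in range(N + 1)]
--     dp[0][0] = 1
--     for i in range(1, N + 1):
--         ai = a[i - 1]
--         dp[i][0] = 1
--         for k in range(1, K + 1):
--             c = dp[i - 1][k] + dp[i][k - 1]
--             if k - ai - 1 >= 0:
--                 c -= dp[i - 1][k - ai - 1]
--             dp[i][k] = c % MOD
--             # debug(f"{i} kids share {k} candies: => {dp[i][k]}")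
--     return dp[N][K]
-- ===== SOURCE B (Python) =====
-- MOD = 1000000007
--
--
-- def solve(N: int, K: int, a: "List[int]"):
--     # Rolling 1-D row; each cell computed by the direct definition:
--     # dp[k] = sum over j (candies given to child i, 0 <= j <= min(a[i], k)) of prev[k-j], mod MOD.
--     prev = [1] + [0] * K
--     for i in range(N):
--         ai = a[i]
--         prev = [sum(prev[k - j] for j in range(min(ai, k) + 1)) % MOD
--                 for k in range(K + 1)]
--     return prev[K]
-- ===== Notes on version B (the rewrite author's own statement) =====
-- stated objective: simpler
-- what changed: Replaces the 2-D table with prefix-sum-difference recurrence by a rolling one-row DP where each cell is an explicit inner summation over how many candies the current child receives.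
-- outside the precondition, e.g. on solve(1, 2, [-1]): A returns 1, B returns 0; on solve(1, 0, [-5]): A returns 1, B returns 0
import Mathlib
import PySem

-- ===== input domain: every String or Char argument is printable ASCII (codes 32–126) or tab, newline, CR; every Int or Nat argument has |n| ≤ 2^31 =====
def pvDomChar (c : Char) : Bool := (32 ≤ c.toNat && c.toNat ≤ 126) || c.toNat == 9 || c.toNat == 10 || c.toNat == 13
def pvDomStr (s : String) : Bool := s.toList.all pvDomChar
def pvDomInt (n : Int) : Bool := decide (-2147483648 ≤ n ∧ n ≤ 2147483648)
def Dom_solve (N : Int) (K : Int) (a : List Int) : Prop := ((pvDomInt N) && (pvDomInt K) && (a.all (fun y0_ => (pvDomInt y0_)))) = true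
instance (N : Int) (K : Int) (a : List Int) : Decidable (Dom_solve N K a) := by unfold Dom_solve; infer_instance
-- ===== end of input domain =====

-- B replaces A's 2-D table with prefix-sum-difference recurrence by a rolling one-row DP
-- whose cells are computed by the direct inner summation (objective: simpler).

-- ===== PORT A =====
-- dp[i][k] of the Python 2-D list; all indices used are nonnegative and in range on Pre_solve,
-- so Nat indexing with getD/set is exact there.
def tblGet (dp : List (List Int)) (i k : Nat) : Int := (dp.getD i []).getD k 0
def tblSet (dp : List (List Int)) (i k : Nat) (v : Int) : List (List Int) :=
  dp.set i ((dp.getD i []).set k v)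

def solve (N : Int) (K : Int) (a : List Int) : Int :=
  -- dp = [[0] * (K + 1) for _ in range(N + 1)]
  let dp := List.replicate (N + 1).toNat (List.replicate (K + 1).toNat 0)
  -- dp[0][0] = 1
  let dp := tblSet dp 0 0 1
  -- for i in range(1, N + 1): ... for k in range(1, K + 1): ...
  let dp := (List.range N.toNat).foldl (fun dp i0 =>
    let i := i0 + 1
    let ai := a.getD (i - 1) 0          -- a[i-1]; in range on Pre_solve
    let dp := tblSet dp i 0 1
    (List.range K.toNat).foldl (fun dp k0 =>
      let k := k0 + 1
      let c := tblGet dp (i - 1) k + tblGet dp i (k - 1)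
      let c := if 0 ≤ (k : Int) - ai - 1 then c - tblGet dp (i - 1) ((k : Int) - ai - 1).toNat else c
      tblSet dp i k (PySem.Int.mod c 1000000007)) dp) dp
  tblGet dp N.toNat K.toNat

-- ===== PORT B =====
def solve_alt (N : Int) (K : Int) (a : List Int) : Int :=
  -- prev = [1] + [0] * K
  let prev := (1 : Int) :: List.replicate K.toNat 0
  let prev := (List.range N.toNat).foldl (fun prev i =>
    let ai := a.getD i 0                -- a[i]; in range on Pre_solve
    -- [sum(prev[k-j] for j in range(min(ai,k)+1)) % MOD for k in range(K+1)]
    (List.range (K.toNat + 1)).map (fun (k : Nat) =>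
      PySem.Int.mod ((List.range (min ai (k : Int) + 1).toNat).foldl
        (fun (s : Int) (j : Nat) => s + prev.getD (k - j) 0) 0) 1000000007)) prev
  prev.getD K.toNat 0

-- ===== PRECONDITION & SPEC =====
-- Pre_ keeps the problem's natural domain: N, K nonnegative, at least N caps, and the used caps
-- nonnegative.  It excludes inputs where A raises IndexError (N < 0, K < 0, fewer than N caps,
-- or a used cap ≤ -2 with K ≥ 1) and the remaining negative-cap corners, where A still returns a
-- value (e.g. 1) produced by its leftover prefix telescoping while B's empty inner sum gives 0.
def Pre_solve (N : Int) (K : Int) (a : List Int) : Prop :=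
  0 ≤ N ∧ 0 ≤ K ∧ N ≤ a.length ∧ ∀ x ∈ a.take N.toNat, 0 ≤ x
instance (N : Int) (K : Int) (a : List Int) : Decidable (Pre_solve N K a) := by
  unfold Pre_solve; infer_instance

def pvWitness_solve : Int × Int × List Int := (2, 3, [1, 2])

def Spec_solve (N : Int) (K : Int) (a : List Int) (out : Int) : Prop := out = solve_alt N K a
instance (N : Int) (K : Int) (a : List Int) (out : Int) : Decidable (Spec_solve N K a out) := by
  unfold Spec_solve; infer_instance

-- ===== CLAIM (what is proved, stated in full; the proofs are below) =====
def Claim_equal_solve : Prop := ∀ (N : Int) (K : Int) (a : List Int), Dom_solve N K a → Pre_solve N K a → Spec_solve N K a (solve N K a)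

-- ===== LEMMAS AND PROOFS =====

def ssum (prev : List Int) (k : Nat) : Nat → Int
  | 0 => 0
  | n + 1 => ssum prev k n + prev.getD (k - n) 0

def bsum (prev : List Int) (ai : Int) (k : Nat) : Int :=
  PySem.Int.mod (ssum prev k (min ai (k : Int) + 1).toNat) 1000000007

def brow (K : Nat) (a : List Int) : Nat → List Int
  | 0 => 1 :: List.replicate K 0
  | i + 1 => (List.range (K + 1)).map (bsum (brow K a i) (a.getD i 0))

def cellA (prev cur : List Int) (ai : Int) (k0 : Nat) : Int :=
  let k := k0 + 1
  let c := prev.getD k 0 + cur.getD (k - 1) 0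
  let c := if 0 ≤ (k : Int) - ai - 1 then c - prev.getD ((k : Int) - ai - 1).toNat 0 else c
  PySem.Int.mod c 1000000007

theorem foldl_range_ssum (prev : List Int) (k : Nat) :
    ∀ (n : Nat) (s : Int),
      (List.range n).foldl (fun (s : Int) (j : Nat) => s + prev.getD (k - j) 0) s = s + ssum prev k n := by
  intro n
  induction n with
  | zero => intro s; simp [ssum]
  | succ n ih =>
    intro s
    rw [List.range_succ, List.foldl_append, ih]
    simp [ssum, add_assoc]

theorem ssum_shift (prev : List Int) (k : Nat) :
    ∀ n, ssum prev (k + 1) (n + 1) = prev.getD (k + 1) 0 + ssum prev k n := by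
  intro n
  induction n with
  | zero => simp [ssum]
  | succ n ih =>
    show ssum prev (k+1) (n+1) + prev.getD (k + 1 - (n+1)) 0 = _
    rw [ih, Nat.succ_sub_succ]
    simp [ssum]; ring

theorem mod_pos_eq (c : Int) : PySem.Int.mod c 1000000007 = c % 1000000007 :=
  PySem.Int.mod_eq_emod_of_pos (by norm_num)

theorem cell_eq (prev cur : List Int) (ai : Int) (k : Nat) (hai : 0 ≤ ai)
    (hc : cur.getD k 0 = bsum prev ai k) :
    cellA prev cur ai k = bsum prev ai (k + 1) := by
  unfold cellA
  simp only [Nat.add_sub_cancel, mod_pos_eq]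
  rw [hc]
  unfold bsum
  simp only [mod_pos_eq]
  by_cases h : ai ≤ (k : Int)
  · have hcond : 0 ≤ ((k:Nat) + 1 : Int) - ai - 1 := by push_cast; omega
    rw [if_pos (by push_cast at hcond; omega)]
    have h1 : min ai ((k:Int)) = ai := by omega
    have h2 : min ai (((k+1 : Nat)):Int) = ai := by push_cast; omega
    have h3 : (ai + 1).toNat = ai.toNat + 1 := by omega
    have h4 : ((((k:Nat) + 1 : Nat)):Int) - ai - 1 = ((k - ai.toNat : Nat) : Int) := by
      push_cast; omega
    rw [h1, h2, h3]
    rw [ssum_shift]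
    have h5 : ssum prev k (ai.toNat + 1) = ssum prev k ai.toNat + prev.getD (k - ai.toNat) 0 := rfl
    rw [h5]
    rw [show ((((k+1:Nat)):Int) - ai - 1).toNat = k - ai.toNat by rw [h4]; simp]
    omega
  · rw [if_neg (by push_cast; omega)]
    have h1 : min ai ((k:Int)) = (k:Int) := by omega
    have h2 : min ai (((k+1 : Nat)):Int) = ((k+1 : Nat):Int) := by push_cast; omega
    rw [h1, h2]
    have h3 : ((k:Int) + 1).toNat = k + 1 := by omega
    have h4 : (((k+1:Nat):Int) + 1).toNat = k + 2 := by push_cast; omega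
    rw [h3, h4, ssum_shift]
    omega

theorem row_fold (prev : List Int) (ai : Int) (K : Nat) (hai : 0 ≤ ai)
    (h0 : bsum prev ai 0 = 1) :
    ∀ t, t ≤ K →
      (List.range t).foldl (fun cur k0 => cur.set (k0 + 1) (cellA prev cur ai k0))
        (1 :: List.replicate K 0)
      = (List.range (t + 1)).map (bsum prev ai) ++ List.replicate (K - t) 0 := by
  intro t
  induction t with
  | zero => intro _; simp [h0]
  | succ t ih =>
    intro ht
    have ht' : t ≤ K := by omega
    rw [List.range_succ, List.foldl_append, ih ht']
    have hget : ((List.range (t + 1)).map (bsum prev ai) ++ List.replicate (K - t) 0).getD t 0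
        = bsum prev ai t := by
      rw [List.getD_eq_getElem?_getD, List.getElem?_append_left (by simp)]
      simp
    have hcell : cellA prev ((List.range (t + 1)).map (bsum prev ai) ++ List.replicate (K - t) 0) ai t
        = bsum prev ai (t + 1) := cell_eq _ _ _ _ hai hget
    simp only [List.foldl_cons, List.foldl_nil, hcell]
    have hrep : List.replicate (K - t) (0 : Int) = 0 :: List.replicate (K - (t + 1)) 0 := by
      rw [show K - t = (K - (t+1)) + 1 by omega]
      rfl
    rw [List.set_append_right (t+1) _ (by simp)]
    simp only [List.length_map, List.length_range, Nat.sub_self]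
    rw [hrep]
    rw [show (List.range (t + 1 + 1)).map (bsum prev ai)
          = (List.range (t + 1)).map (bsum prev ai) ++ [bsum prev ai (t + 1)] by
        rw [List.range_succ, List.map_append]; simp]
    simp

theorem tbl_fold (ai : Int) (p q : Nat) (hpq : p ≠ q) :
    ∀ (l : List Nat) (dp : List (List Int)), q < dp.length →
      l.foldl (fun dp k0 =>
        tblSet dp q (k0 + 1)
          (PySem.Int.mod
            (if 0 ≤ ((k0 + 1 : Nat) : Int) - ai - 1 then
              tblGet dp p (k0 + 1) + tblGet dp q k0 - tblGet dp p (((k0 + 1 : Nat) : Int) - ai - 1).toNat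
             else tblGet dp p (k0 + 1) + tblGet dp q k0)
            1000000007)) dp
      = dp.set q (l.foldl (fun cur k0 => cur.set (k0 + 1) (cellA (dp.getD p []) cur ai k0))
          (dp.getD q [])) := by
  intro l
  induction l with
  | nil =>
    intro dp hlen
    simp only [List.foldl_nil]
    rw [List.getD_eq_getElem?_getD, List.getElem?_eq_getElem hlen]
    simp
  | cons k0 l ih =>
    intro dp hlen
    simp only [List.foldl_cons]
    have hstep : (tblSet dp q (k0 + 1)
          (PySem.Int.mod
            (if 0 ≤ ((k0 + 1 : Nat) : Int) - ai - 1 then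
              tblGet dp p (k0 + 1) + tblGet dp q k0 - tblGet dp p (((k0 + 1 : Nat) : Int) - ai - 1).toNat
             else tblGet dp p (k0 + 1) + tblGet dp q k0)
            1000000007))
        = dp.set q ((dp.getD q []).set (k0 + 1) (cellA (dp.getD p []) (dp.getD q []) ai k0)) := by
      simp only [tblSet, tblGet, cellA, Nat.add_sub_cancel]
    rw [hstep, ih _ (by simpa using hlen)]
    have h1 : (dp.set q ((dp.getD q []).set (k0 + 1) (cellA (dp.getD p []) (dp.getD q []) ai k0))).getD p []
        = dp.getD p [] := by
      rw [List.getD_eq_getElem?_getD, List.getElem?_set_ne (by omega), ← List.getD_eq_getElem?_getD]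
    have h2 : (dp.set q ((dp.getD q []).set (k0 + 1) (cellA (dp.getD p []) (dp.getD q []) ai k0))).getD q []
        = (dp.getD q []).set (k0 + 1) (cellA (dp.getD p []) (dp.getD q []) ai k0) := by
      rw [List.getD_eq_getElem?_getD, List.getElem?_set_self hlen]
      rfl
    rw [h1, h2, List.set_set]

theorem alt_rows (K : Int) (a : List Int) : ∀ n,
    (List.range n).foldl (fun prev i =>
      let ai := a.getD i 0
      (List.range (K.toNat + 1)).map (fun (k : Nat) =>
        PySem.Int.mod ((List.range (min ai (k : Int) + 1).toNat).foldl
          (fun (s : Int) (j : Nat) => s + prev.getD (k - j) 0) 0) 1000000007))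
      ((1 : Int) :: List.replicate K.toNat 0) = brow K.toNat a n := by
  intro n
  induction n with
  | zero => rfl
  | succ n ih =>
    rw [show List.range (n + 1) = List.range n ++ [n] from List.range_succ, List.foldl_append, ih]
    simp only [List.foldl_cons, List.foldl_nil]
    show (List.range (K.toNat + 1)).map _ = brow K.toNat a (n + 1)
    rw [show brow K.toNat a (n + 1)
        = (List.range (K.toNat + 1)).map (bsum (brow K.toNat a n) (a.getD n 0)) from rfl]
    congr 1
    funext k
    rw [foldl_range_ssum, zero_add]
    rfl

theorem brow_zero (K : Nat) (a : List Int) (n : Nat) (hcap : ∀ j, j < n → 0 ≤ a.getD j 0) :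
    ∀ i, i ≤ n → (brow K a i).getD 0 0 = 1 := by
  intro i
  induction i with
  | zero => intro _; rfl
  | succ i ih =>
    intro hle
    have hai : 0 ≤ a.getD i 0 := hcap i (by omega)
    unfold brow
    rw [List.getD_eq_getElem?_getD, List.getElem?_map]
    rw [show (List.range (K + 1))[0]? = some 0 by simp]
    show bsum (brow K a i) (a.getD i 0) 0 = 1
    unfold bsum
    rw [show (min (a.getD i 0) ((0 : Nat) : Int) + 1).toNat = 1 by omega]
    show PySem.Int.mod (0 + (brow K a i).getD 0 0) 1000000007 = 1
    rw [zero_add, ih (by omega), mod_pos_eq]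
    decide

theorem bsum_zero (prev : List Int) (ai : Int) (hai : 0 ≤ ai) (h1 : prev.getD 0 0 = 1) :
    bsum prev ai 0 = 1 := by
  unfold bsum
  rw [show (min ai ((0 : Nat) : Int) + 1).toNat = 1 by omega]
  show PySem.Int.mod (0 + prev.getD 0 0) 1000000007 = 1
  rw [zero_add, h1, mod_pos_eq]
  decide

theorem outer_inv (N K : Int) (a : List Int) (hN : 0 ≤ N) (hK : 0 ≤ K)
    (hcap : ∀ j, j < N.toNat → 0 ≤ a.getD j 0) :
    ∀ i, i ≤ N.toNat →
      (List.range i).foldl (fun dp i0 =>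
        let i := i0 + 1
        let ai := a.getD (i - 1) 0
        let dp := tblSet dp i 0 1
        (List.range K.toNat).foldl (fun dp k0 =>
          let k := k0 + 1
          let c := tblGet dp (i - 1) k + tblGet dp i (k - 1)
          let c := if 0 ≤ (k : Int) - ai - 1 then c - tblGet dp (i - 1) ((k : Int) - ai - 1).toNat else c
          tblSet dp i k (PySem.Int.mod c 1000000007)) dp)
        (tblSet (List.replicate (N + 1).toNat (List.replicate (K + 1).toNat 0)) 0 0 1)
      = (List.range (i + 1)).map (brow K.toNat a)
          ++ List.replicate (N.toNat - i) (List.replicate (K.toNat + 1) 0) := by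
  intro i
  induction i with
  | zero =>
    intro _
    simp only [tblSet]
    rw [show (N + 1).toNat = N.toNat + 1 by omega, show (K + 1).toNat = K.toNat + 1 by omega]
    simp [List.replicate_succ, brow]
  | succ i ih =>
    intro hle
    rw [show List.range (i + 1) = List.range i ++ [i] from List.range_succ, List.foldl_append,
      ih (by omega)]
    simp only [List.foldl_cons, List.foldl_nil, Nat.add_sub_cancel]
    have hlenmap : ((List.range (i + 1)).map (brow K.toNat a)).length = i + 1 := by simp
    have hrep : List.replicate (N.toNat - i) (List.replicate (K.toNat + 1) (0 : Int))
        = List.replicate (K.toNat + 1) 0 :: List.replicate (N.toNat - (i + 1)) (List.replicate (K.toNat + 1) 0) := by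
      rw [show N.toNat - i = (N.toNat - (i + 1)) + 1 by omega]
      rfl
    set z := List.replicate (K.toNat + 1) (0 : Int) with hz
    set dpI := (List.range (i + 1)).map (brow K.toNat a) ++ List.replicate (N.toNat - i) z with hdpI
    have hlenI : dpI.length = N.toNat + 1 := by
      rw [hdpI]; simp; omega
    have hgetI1 : dpI.getD (i + 1) [] = z := by
      rw [hdpI, List.getD_eq_getElem?_getD, List.getElem?_append_right (by simp), hlenmap]
      rw [Nat.sub_self, hrep]
      rfl
    have hstep2 : tblSet dpI (i + 1) 0 1 = dpI.set (i + 1) ((1 : Int) :: List.replicate K.toNat 0) := by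
      unfold tblSet
      rw [hgetI1, hz, show K.toNat + 1 = Nat.succ K.toNat from rfl, List.replicate_succ]
      rfl
    rw [hstep2]
    rw [tbl_fold (a.getD i 0) i (i + 1) (by omega) (List.range K.toNat) _ (by rw [List.length_set, hlenI]; omega)]
    have hgA : (dpI.set (i + 1) ((1 : Int) :: List.replicate K.toNat 0)).getD i [] = brow K.toNat a i := by
      rw [List.getD_eq_getElem?_getD, List.getElem?_set_ne (by omega), hdpI,
        List.getElem?_append_left (by simp), List.getElem?_map]
      simp
    have hgB : (dpI.set (i + 1) ((1 : Int) :: List.replicate K.toNat 0)).getD (i + 1) [] = (1 : Int) :: List.replicate K.toNat 0 := by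
      rw [List.getD_eq_getElem?_getD, List.getElem?_set_self (by rw [hlenI]; omega)]
      rfl
    rw [hgA, hgB]
    have hai : 0 ≤ a.getD i 0 := hcap i (by omega)
    have h0 : bsum (brow K.toNat a i) (a.getD i 0) 0 = 1 :=
      bsum_zero _ _ hai (brow_zero K.toNat a N.toNat hcap i (by omega))
    rw [row_fold (brow K.toNat a i) (a.getD i 0) K.toNat hai h0 K.toNat le_rfl]
    rw [Nat.sub_self]
    rw [show ((List.range (K.toNat + 1)).map (bsum (brow K.toNat a i) (a.getD i 0)) ++ List.replicate 0 0)
        = brow K.toNat a (i + 1) by simp [brow]]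
    rw [List.set_set, hdpI]
    rw [List.set_append_right (i + 1) _ (by simp), hlenmap, Nat.sub_self, hrep]
    rw [show (List.replicate (K.toNat + 1) (0:Int) :: List.replicate (N.toNat - (i + 1)) (List.replicate (K.toNat + 1) 0)).set 0 (brow K.toNat a (i + 1))
        = brow K.toNat a (i + 1) :: List.replicate (N.toNat - (i + 1)) (List.replicate (K.toNat + 1) 0) from rfl]
    rw [show List.range (i + 1 + 1) = List.range (i + 1) ++ [i + 1] from List.range_succ, List.map_append]
    simp
    exact Or.inr rfl

-- ===== VERDICT (by name: the statement is the Claim_ definition above) =====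
theorem solve_spec : Claim_equal_solve := by
  intro N K a _ hpre
  obtain ⟨hN, hK, hlena, hcap⟩ := hpre
  have hcap' : ∀ j, j < N.toNat → 0 ≤ a.getD j 0 := by
    intro j hj
    have hj' : j < a.length := by omega
    have hmem : a[j] ∈ a.take N.toNat := by
      rw [show a[j] = (a.take N.toNat)[j]'(by simp; omega) from (List.getElem_take ..).symm]
      exact List.getElem_mem _
    have := hcap _ hmem
    rw [List.getD_eq_getElem?_getD, List.getElem?_eq_getElem hj']
    simpa using this
  show solve N K a = solve_alt N K a
  show tblGet ((List.range N.toNat).foldl (fun dp i0 =>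
          let i := i0 + 1
          let ai := a.getD (i - 1) 0
          let dp := tblSet dp i 0 1
          (List.range K.toNat).foldl (fun dp k0 =>
            let k := k0 + 1
            let c := tblGet dp (i - 1) k + tblGet dp i (k - 1)
            let c := if 0 ≤ (k : Int) - ai - 1 then c - tblGet dp (i - 1) ((k : Int) - ai - 1).toNat else c
            tblSet dp i k (PySem.Int.mod c 1000000007)) dp)
          (tblSet (List.replicate (N + 1).toNat (List.replicate (K + 1).toNat 0)) 0 0 1)) N.toNat K.toNat
      = ((List.range N.toNat).foldl (fun prev i =>
          let ai := a.getD i 0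
          (List.range (K.toNat + 1)).map (fun (k : Nat) =>
            PySem.Int.mod ((List.range (min ai (k : Int) + 1).toNat).foldl
              (fun (s : Int) (j : Nat) => s + prev.getD (k - j) 0) 0) 1000000007)) ((1 : Int) :: List.replicate K.toNat 0)).getD K.toNat 0
  rw [outer_inv N K a hN hK hcap' N.toNat le_rfl, alt_rows K a N.toNat]
  unfold tblGet
  rw [Nat.sub_self]
  rw [List.getD_eq_getElem?_getD (l := _ ++ _), List.getElem?_append_left (by simp),
    List.getElem?_map]
  simp
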